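-- pv_equiv track=rewrite | github.com/ayushi7rawat/Gooogle-Foobar | Level 3/solution.py | find_removable_walls
-- ===== SOURCE A (Python) =====
-- def find_adjacents_of_a_cell(x, y, number_columns, number_rows):
--     # Simply returns an array of coordinates of cells
--     # that are adjacent to a given one passed as parameter (x,y).
--     # Also requires the size of the containing matrix to take boundaries into consideration.
--
--     if x >= number_rows or y >= number_columns:
--         return []
--
--     # transform into indexes
--     number_columns = number_columns - 1
--     number_rows = number_rows - 1
--
--     if x == 0 and y == 0:
--         return [(x, y + 1), (x + 1, y)]
--     if x == 0 and 0 < y < number_columns: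
--         return [(x, y + 1), (x + 1, y), (x, y - 1)]
--     if x == 0 and y == number_columns:
--         return [(x + 1, y), (x, y - 1)]
--
--     if 0 < x < number_rows and y == 0:
--         return [(x - 1, y), (x, y + 1), (x + 1, y)]
--     if 0 < x < number_rows and 0 < y < number_columns:
--         return [(x - 1, y), (x, y + 1), (x + 1, y), (x, y - 1)]
--     if 0 < x < number_rows and y == number_columns:
--         return [(x - 1, y), (x + 1, y), (x, y - 1)]
--
--     if x == number_rows and y == 0:
--         return [(x - 1, y), (x, y + 1)]
--     if x == number_rows and 0 < y < number_columns:
--         return [(x - 1, y), (x, y + 1), (x, y - 1)]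
--     if x == number_rows and y == number_columns:
--         return [(x - 1, y), (x, y - 1)]
--
-- def find_removable_walls(paths_matrix):
--     # Produces a list of walls that, if removed, could produce a shorter path
--
--     number_cols = len(paths_matrix[0])
--     number_rows = len(paths_matrix)
--
--     removable_walls = []
--
--     for i in range(0, number_rows):
--         for j in range(0, number_cols):
--             # walls that can be removed in a useful way to produce a shorter paths
--             # have 2 characteristics: path length between 1000 and 2000 and are adjacent to a cell which is
--             # part of an existing path (checked below when we do the paths_matrix[adj_x][adj_y] < 1000 comparison)
--
--             if 1000 < paths_matrix[i][j] < 2000: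
--                 adjacents = find_adjacents_of_a_cell(i, j, number_cols, number_rows)
--                 counter = 0
--
--                 for adj in adjacents:
--                     adj_x = adj[0]
--                     adj_y = adj[1]
--
--                     if paths_matrix[adj_x][adj_y] < 1000:
--                         counter += 1
--                         if counter > 0:
--                             removable_walls.append((i, j))
--                             break
--
--     return removable_walls
-- ===== SOURCE B (Python) =====
-- def find_removable_walls(paths_matrix):
--     # Two staged passes: first dilate every path cell (value < 1000) into a set of
--     # marked neighbor coordinates, then collect the walls that were marked.
--     rows = len(paths_matrix)
--     cols = len(paths_matrix[0])
--     marked = set()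
--     for i in range(rows):
--         for j in range(cols):
--             if paths_matrix[i][j] < 1000:
--                 marked.add((i - 1, j))
--                 marked.add((i + 1, j))
--                 marked.add((i, j - 1))
--                 marked.add((i, j + 1))
--     return [(i, j) for i in range(rows) for j in range(cols)
--             if 1000 < paths_matrix[i][j] < 2000 and (i, j) in marked]
-- ===== Notes on version B (the rewrite author's own statement) =====
-- stated objective: alternative
-- what changed: Inverts the traversal: instead of scanning a 9-case adjacency branch table for each wall, B first dilates every path cell (value < 1000) into a set of marked neighbor coordinates in one pass, then a second pass collects the walls (1000 < v < 2000) found in that set.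
-- outside the precondition, e.g. on find_removable_walls([[1500, 500]]): A returns [(0, 0)], B returns [(0, 0)]
import Mathlib
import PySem

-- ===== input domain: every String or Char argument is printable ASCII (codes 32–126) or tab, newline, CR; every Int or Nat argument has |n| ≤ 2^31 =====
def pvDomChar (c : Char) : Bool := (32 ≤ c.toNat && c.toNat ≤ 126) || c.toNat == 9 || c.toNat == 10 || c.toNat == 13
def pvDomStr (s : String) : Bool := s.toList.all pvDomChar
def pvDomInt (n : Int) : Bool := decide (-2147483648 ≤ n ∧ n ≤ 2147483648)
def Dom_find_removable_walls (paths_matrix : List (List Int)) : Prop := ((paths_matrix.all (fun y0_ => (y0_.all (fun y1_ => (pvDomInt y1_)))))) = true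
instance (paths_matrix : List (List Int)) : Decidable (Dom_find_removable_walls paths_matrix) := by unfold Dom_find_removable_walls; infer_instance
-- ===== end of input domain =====

-- B replaces A's per-wall scan through a 9-case adjacency branch table by two staged passes:
-- dilate every path cell into a marked set of neighbor coordinates, then collect the marked
-- walls (objective: alternative — inverted traversal, a set data structure instead of a table).

-- ===== PORT A =====

-- paths_matrix[i][j]; out-of-range (Python IndexError) is excluded by Pre_, the default 0 is
-- never read there (shared by both ports: both Pythons index the matrix the same way)
def pvAt (m : List (List Int)) (i j : Int) : Int :=
  PySem.List.pyGetD (PySem.List.pyGetD m i []) j 0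

def pvAdjacentsA (x y number_columns number_rows : Int) : List (Int × Int) :=
  if x ≥ number_rows ∨ y ≥ number_columns then []
  else
    let nc := number_columns - 1
    let nr := number_rows - 1
    if x = 0 ∧ y = 0 then [(x, y + 1), (x + 1, y)]
    else if x = 0 ∧ 0 < y ∧ y < nc then [(x, y + 1), (x + 1, y), (x, y - 1)]
    else if x = 0 ∧ y = nc then [(x + 1, y), (x, y - 1)]
    else if 0 < x ∧ x < nr ∧ y = 0 then [(x - 1, y), (x, y + 1), (x + 1, y)]
    else if 0 < x ∧ x < nr ∧ 0 < y ∧ y < nc then [(x - 1, y), (x, y + 1), (x + 1, y), (x, y - 1)]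
    else if 0 < x ∧ x < nr ∧ y = nc then [(x - 1, y), (x + 1, y), (x, y - 1)]
    else if x = nr ∧ y = 0 then [(x - 1, y), (x, y + 1)]
    else if x = nr ∧ 0 < y ∧ y < nc then [(x - 1, y), (x, y + 1), (x, y - 1)]
    else if x = nr ∧ y = nc then [(x - 1, y), (x, y - 1)]
    else []  -- Python falls through to None here; unreachable for 0 ≤ x < rows, 0 ≤ y < cols

-- the inner 'for adj in adjacents' loop with its counter and break
def pvScanAdjA (m : List (List Int)) (i j : Int) :
    List (Int × Int) → Int → List (Int × Int) → List (Int × Int)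
  | [], _, removable => removable
  | adj :: rest, counter, removable =>
      let adj_x := adj.1
      let adj_y := adj.2
      if pvAt m adj_x adj_y < 1000 then
        let counter := counter + 1
        if counter > 0 then removable ++ [(i, j)]
        else pvScanAdjA m i j rest counter removable
      else pvScanAdjA m i j rest counter removable

def find_removable_walls (paths_matrix : List (List Int)) : List (Int × Int) :=
  let number_cols : Int := ((PySem.List.pyGetD paths_matrix 0 []).length : Int)
  let number_rows : Int := (paths_matrix.length : Int)
  (PySem.List.pyRange 0 number_rows 1).foldl (fun removable i =>
    (PySem.List.pyRange 0 number_cols 1).foldl (fun removable j =>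
      if 1000 < pvAt paths_matrix i j ∧ pvAt paths_matrix i j < 2000 then
        pvScanAdjA paths_matrix i j (pvAdjacentsA i j number_cols number_rows) 0 removable
      else removable) removable) []

-- ===== PORT B =====

-- stage 1: the double loop that marks the four neighbors of every path cell
def pvMarkedB (m : List (List Int)) (rows cols : Int) : PySem.Set (Int × Int) :=
  (PySem.List.pyRange 0 rows 1).foldl (fun marked i =>
    (PySem.List.pyRange 0 cols 1).foldl (fun marked j =>
      if pvAt m i j < 1000 then
        PySem.Set.add (PySem.Set.add (PySem.Set.add (PySem.Set.add marked
          (i - 1, j)) (i + 1, j)) (i, j - 1)) (i, j + 1)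
      else marked) marked) PySem.Set.empty

-- stage 2: the comprehension collecting walls that are in the marked set
def find_removable_walls_alt (paths_matrix : List (List Int)) : List (Int × Int) :=
  let rows : Int := (paths_matrix.length : Int)
  let cols : Int := ((PySem.List.pyGetD paths_matrix 0 []).length : Int)
  let marked := pvMarkedB paths_matrix rows cols
  (PySem.List.pyRange 0 rows 1).flatMap (fun i =>
    ((PySem.List.pyRange 0 cols 1).filter (fun j =>
      decide (1000 < pvAt paths_matrix i j) && decide (pvAt paths_matrix i j < 2000) &&
        PySem.Set.contains marked (i, j))).map (fun j => (i, j)))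

-- ===== PRECONDITION & SPEC =====

-- Pre_ excludes the empty matrix, matrices with a row shorter than row 0 (the row-major scan
-- indexes past it and Python raises IndexError), and 1-row/1-column shapes containing a wall
-- cell (1000 < v < 2000), on which A's adjacency table emits out-of-range neighbour coordinates
-- and A raises IndexError on most of them (on the rest A's early break saves it and B agrees anyway).
def Pre_find_removable_walls (paths_matrix : List (List Int)) : Prop :=
  paths_matrix ≠ [] ∧
  (∀ row ∈ paths_matrix, (paths_matrix.headD []).length ≤ row.length) ∧
  ((∃ row ∈ paths_matrix, ∃ v ∈ row.take (paths_matrix.headD []).length,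
      1000 < v ∧ v < 2000) →
    2 ≤ paths_matrix.length ∧ 2 ≤ (paths_matrix.headD []).length)

instance (paths_matrix : List (List Int)) : Decidable (Pre_find_removable_walls paths_matrix) := by
  unfold Pre_find_removable_walls; infer_instance

def pvWitness_find_removable_walls : List (List Int) :=
  [[500, 1500], [1500, 500]]

def Spec_find_removable_walls (paths_matrix : List (List Int)) (out : List (Int × Int)) : Prop := out = find_removable_walls_alt paths_matrix
instance (paths_matrix : List (List Int)) (out : List (Int × Int)) : Decidable (Spec_find_removable_walls paths_matrix out) := by unfold Spec_find_removable_walls; infer_instance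

-- ===== CLAIM (what is proved, stated in full; the proofs are below) =====
def Claim_equal_find_removable_walls : Prop := ∀ (paths_matrix : List (List Int)), Dom_find_removable_walls paths_matrix → Pre_find_removable_walls paths_matrix → Spec_find_removable_walls paths_matrix (find_removable_walls paths_matrix)

-- ===== LEMMAS AND PROOFS =====

-- the counter/break inner loop appends (i, j) exactly when some adjacent holds a value < 1000
theorem pvScanAdjA_eq_any (m : List (List Int)) (i j : Int) (adjs : List (Int × Int))
    (removable : List (Int × Int)) :
    pvScanAdjA m i j adjs 0 removable =
      if adjs.any (fun a => decide (pvAt m a.1 a.2 < 1000)) then removable ++ [(i, j)]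
      else removable := by
  induction adjs with
  | nil => rfl
  | cons a rest ih =>
      by_cases h : pvAt m a.1 a.2 < 1000
      · simp [pvScanAdjA, h]
      · cases hr : rest.any (fun a => decide (pvAt m a.1 a.2 < 1000)) <;>
          simp [pvScanAdjA, ih, hr, decide_eq_false h]
        omega

theorem pv_merge_ite {α : Type} (p : Prop) [Decidable p] (b : Bool) (acc : List α) (v : α) :
    (if p then (if b then acc ++ [v] else acc) else acc) =
      (if decide p && b then acc ++ [v] else acc) := by
  by_cases h : p <;> cases b <;> simp [h]

-- proof-side bridge: "(i, j) has an in-bounds neighbor holding a value < 1000", as the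
-- four-delta bounds-checked scan both characterizations below are matched against
def pvOpenNeighbor (m : List (List Int)) (rows cols i j : Int) : Bool :=
  [((-1 : Int), (0 : Int)), (1, 0), (0, -1), (0, 1)].any (fun d =>
    decide (0 ≤ i + d.1) && decide (i + d.1 < rows) && decide (0 ≤ j + d.2) &&
      decide (j + d.2 < cols) && decide (pvAt m (i + d.1) (j + d.2) < 1000))

-- for an in-range cell of a matrix with at least 2 rows and 2 columns, A's adjacency
-- table hits a value < 1000 exactly when the in-bounds delta scan does
theorem pv_table_any_eq (m : List (List Int)) (rows cols i j : Int)
    (h2r : 2 ≤ rows) (h2c : 2 ≤ cols) (hi0 : 0 ≤ i) (hir : i < rows)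
    (hj0 : 0 ≤ j) (hjc : j < cols) :
    (pvAdjacentsA i j cols rows).any (fun a => decide (pvAt m a.1 a.2 < 1000)) =
      pvOpenNeighbor m rows cols i j := by
  rw [Bool.eq_iff_iff]
  simp only [pvAdjacentsA, pvOpenNeighbor]
  rw [if_neg (by omega)]
  split_ifs with h1 h2 h3 h4 h5 h6 h7 h8 h9 <;>
    simp only [List.any_cons, List.any_nil, Bool.or_eq_true, Bool.and_eq_true,
      decide_eq_true_eq, Bool.or_false, add_zero, ← sub_eq_add_neg] <;>
    generalize pvAt m (i - 1) j = v1 <;>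
    generalize pvAt m (i + 1) j = v2 <;>
    generalize pvAt m i (j - 1) = v3 <;>
    generalize pvAt m i (j + 1) = v4 <;>
    omega

-- generic membership characterization of a set-accumulating foldl
theorem pv_mem_foldl_of_char {α β : Type} [BEq α] (l : List β)
    (F : PySem.Set α → β → PySem.Set α) (P : β → α → Prop) (y : α)
    (h : ∀ s x, y ∈ F s x ↔ y ∈ s ∨ P x y) (s : PySem.Set α) :
    y ∈ l.foldl F s ↔ y ∈ s ∨ ∃ x ∈ l, P x y := by
  induction l generalizing s with
  | nil => simp
  | cons x rest ih =>
      simp only [List.foldl_cons, ih, h, List.mem_cons]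
      constructor
      · rintro ((hs | hp) | ⟨x', hx', hp⟩)
        · exact Or.inl hs
        · exact Or.inr ⟨x, Or.inl rfl, hp⟩
        · exact Or.inr ⟨x', Or.inr hx', hp⟩
      · rintro (hs | ⟨x', hx' | hx', hp⟩)
        · exact Or.inl (Or.inl hs)
        · exact Or.inl (Or.inr (hx' ▸ hp))
        · exact Or.inr ⟨x', hx', hp⟩

-- membership in B's marked set: exactly the neighbors of some in-range path cell
theorem pv_mem_marked (m : List (List Int)) (rows cols : Int) (p : Int × Int) :
    p ∈ pvMarkedB m rows cols ↔
      ∃ x, (0 ≤ x ∧ x < rows) ∧ ∃ y, (0 ≤ y ∧ y < cols) ∧ pvAt m x y < 1000 ∧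
        (p = (x - 1, y) ∨ p = (x + 1, y) ∨ p = (x, y - 1) ∨ p = (x, y + 1)) := by
  unfold pvMarkedB
  rw [pv_mem_foldl_of_char _ _
    (fun i q => ∃ y, (0 ≤ y ∧ y < cols) ∧ pvAt m i y < 1000 ∧
      (q = (i - 1, y) ∨ q = (i + 1, y) ∨ q = (i, y - 1) ∨ q = (i, y + 1))) p
    (fun s i => by
      rw [pv_mem_foldl_of_char _ _
        (fun j q => pvAt m i j < 1000 ∧
          (q = (i - 1, j) ∨ q = (i + 1, j) ∨ q = (i, j - 1) ∨ q = (i, j + 1))) p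
        (fun s' j => by
          by_cases h : pvAt m i j < 1000
          · rw [if_pos h]
            simp only [PySem.Set.mem_add, h, true_and]
            tauto
          · simp [h]) s]
      simp only [PySem.List.mem_pyRange_one]) PySem.Set.empty]
  simp only [PySem.List.mem_pyRange_one, PySem.Set.empty, List.not_mem_nil, false_or]

-- for an in-range cell, membership in the marked set is the in-bounds delta scan
theorem pv_contains_marked_eq (m : List (List Int)) (rows cols i j : Int)
    (hi0 : 0 ≤ i) (hir : i < rows) (hj0 : 0 ≤ j) (hjc : j < cols) :
    PySem.Set.contains (pvMarkedB m rows cols) (i, j) = pvOpenNeighbor m rows cols i j := by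
  rw [Bool.eq_iff_iff, PySem.Set.contains_iff, pv_mem_marked]
  simp only [pvOpenNeighbor, List.any_cons, List.any_nil, Bool.or_eq_true,
    Bool.and_eq_true, decide_eq_true_eq, Bool.or_false, add_zero, ← sub_eq_add_neg,
    Prod.mk.injEq]
  constructor
  · rintro ⟨x, ⟨hx0, hxr⟩, y, ⟨hy0, hyc⟩, hv, (⟨h1, h2⟩ | ⟨h1, h2⟩ | ⟨h1, h2⟩ | ⟨h1, h2⟩)⟩
    · exact Or.inr (Or.inl ⟨⟨⟨⟨by omega, by omega⟩, hj0⟩, hjc⟩,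
        by rw [show i + 1 = x by omega, h2]; exact hv⟩)
    · exact Or.inl ⟨⟨⟨⟨by omega, by omega⟩, hj0⟩, hjc⟩,
        by rw [show i - 1 = x by omega, h2]; exact hv⟩
    · exact Or.inr (Or.inr (Or.inr ⟨⟨⟨⟨hi0, hir⟩, by omega⟩, by omega⟩,
        by rw [h1, show j + 1 = y by omega]; exact hv⟩))
    · exact Or.inr (Or.inr (Or.inl ⟨⟨⟨⟨hi0, hir⟩, by omega⟩, by omega⟩,
        by rw [h1, show j - 1 = y by omega]; exact hv⟩))
  · rintro (⟨⟨⟨⟨ha, hb⟩, hc⟩, hd⟩, hv⟩ | ⟨⟨⟨⟨ha, hb⟩, hc⟩, hd⟩, hv⟩ |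
      ⟨⟨⟨⟨ha, hb⟩, hc⟩, hd⟩, hv⟩ | ⟨⟨⟨⟨ha, hb⟩, hc⟩, hd⟩, hv⟩)
    · exact ⟨i - 1, ⟨ha, hb⟩, j, ⟨hc, hd⟩, hv, Or.inr (Or.inl ⟨by omega, rfl⟩)⟩
    · exact ⟨i + 1, ⟨ha, hb⟩, j, ⟨hc, hd⟩, hv, Or.inl ⟨by omega, rfl⟩⟩
    · exact ⟨i, ⟨ha, hb⟩, j - 1, ⟨hc, hd⟩, hv,
        Or.inr (Or.inr (Or.inr ⟨rfl, by omega⟩))⟩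
    · exact ⟨i, ⟨ha, hb⟩, j + 1, ⟨hc, hd⟩, hv,
        Or.inr (Or.inr (Or.inl ⟨rfl, by omega⟩))⟩

theorem pv_head_eq (m : List (List Int)) : PySem.List.pyGetD m 0 [] = m.headD [] := by
  cases m <;> simp [PySem.List.pyGetD, PySem.List.pyGet?, PySem.List.pyIdx?]

-- A rewritten cell-wise: the appended-once-per-cell loop as a flatMap of filtered ranges
theorem find_removable_walls_eq_flatMap (m : List (List Int)) :
    find_removable_walls m =
      (PySem.List.pyRange 0 (m.length : Int) 1).flatMap (fun i =>
        ((PySem.List.pyRange 0 ((m.headD []).length : Int) 1).filter (fun j =>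
          decide (1000 < pvAt m i j) && decide (pvAt m i j < 2000) &&
            (pvAdjacentsA i j ((m.headD []).length : Int) (m.length : Int)).any
              (fun a => decide (pvAt m a.1 a.2 < 1000)))).map (fun j => (i, j))) := by
  unfold find_removable_walls
  simp only [pv_head_eq, pvScanAdjA_eq_any, pv_merge_ite, PySem.List.foldl_append_if,
    PySem.List.foldl_append_eq_flatMap, List.nil_append, Bool.decide_and]

-- m[i][j] with 0 ≤ i < rows, 0 ≤ j < cols ≤ (m[i]).length is an element of (m[i]).take cols
theorem pvAt_mem_take (m : List (List Int)) (i j : Int) (hi0 : 0 ≤ i)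
    (hir : i < (m.length : Int)) (hj0 : 0 ≤ j) (hjc : j < ((m.headD []).length : Int))
    (hlen : ∀ row ∈ m, (m.headD []).length ≤ row.length) :
    ∃ row ∈ m, pvAt m i j ∈ row.take (m.headD []).length := by
  have hiN : i.toNat < m.length := by omega
  have hrow : PySem.List.pyGetD m i [] = m[i.toNat] :=
    PySem.List.pyGetD_eq_getElem m [] hi0 (by exact_mod_cast hir)
  have hmem : m[i.toNat] ∈ m := List.getElem_mem hiN
  have hjlen : j.toNat < m[i.toNat].length := by
    have := hlen m[i.toNat] hmem
    omega
  refine ⟨m[i.toNat], hmem, ?_⟩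
  have hval : pvAt m i j = m[i.toNat][j.toNat] := by
    unfold pvAt
    rw [hrow]
    exact PySem.List.pyGetD_eq_getElem _ 0 hj0 (by omega)
  rw [hval]
  have hjtake : j.toNat < (m[i.toNat].take (m.headD []).length).length := by
    rw [List.length_take]
    omega
  have : (m[i.toNat].take (m.headD []).length)[j.toNat] = m[i.toNat][j.toNat] :=
    List.getElem_take
  rw [← this]
  exact List.getElem_mem hjtake

-- ===== VERDICT (by name: the statement is the Claim_ definition above) =====
theorem find_removable_walls_spec : Claim_equal_find_removable_walls := by
  intro m _ hpre
  obtain ⟨hne, hlen, hshape⟩ := hpre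
  unfold Spec_find_removable_walls find_removable_walls_alt
  rw [find_removable_walls_eq_flatMap]
  simp only [pv_head_eq]
  rw [List.flatMap_def, List.flatMap_def]
  apply congrArg List.flatten
  apply List.map_congr_left
  intro i hi
  obtain ⟨hi0, hir⟩ := (PySem.List.mem_pyRange_one).1 hi
  have hfilter :
      (PySem.List.pyRange 0 ((m.headD []).length : Int) 1).filter (fun j =>
        decide (1000 < pvAt m i j) && decide (pvAt m i j < 2000) &&
          (pvAdjacentsA i j ((m.headD []).length : Int) (m.length : Int)).any
            (fun a => decide (pvAt m a.1 a.2 < 1000))) =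
      (PySem.List.pyRange 0 ((m.headD []).length : Int) 1).filter (fun j =>
        decide (1000 < pvAt m i j) && decide (pvAt m i j < 2000) &&
          PySem.Set.contains (pvMarkedB m (m.length : Int) ((m.headD []).length : Int)) (i, j)) := by
    apply List.filter_congr
    intro j hj
    obtain ⟨hj0, hjc⟩ := (PySem.List.mem_pyRange_one).1 hj
    by_cases hw : 1000 < pvAt m i j ∧ pvAt m i j < 2000
    · have hwall : ∃ row ∈ m, ∃ v ∈ row.take (m.headD []).length, 1000 < v ∧ v < 2000 := by
        obtain ⟨row, hrm, hvm⟩ := pvAt_mem_take m i j hi0 hir hj0 hjc hlen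
        exact ⟨row, hrm, pvAt m i j, hvm, hw⟩
      obtain ⟨h2r, h2c⟩ := hshape hwall
      rw [pv_table_any_eq m _ _ i j (by exact_mod_cast h2r) (by exact_mod_cast h2c)
        hi0 hir hj0 hjc, pv_contains_marked_eq m _ _ i j hi0 hir hj0 hjc]
    · rcases not_and_or.1 hw with h | h <;> simp [h]
  rw [hfilter]
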